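-- pv_equiv track=rewrite | github.com/nickdeveaux/Bioinformatics | kmerclump.py | is_clump
-- ===== SOURCE A (Python) =====
-- def is_clump(kmer_indices, L, t, i):
--     count = 0
--     for index in kmer_indices:
--         if i - index <= L:
--             count += 1
--     if count >= t:
--         return True
--     else:
--         return False
-- ===== SOURCE B (Python) =====
-- def is_clump(kmer_indices, L, t, i):
--     s = sorted(kmer_indices)
--     x = i - L
--     lo, hi = 0, len(s)
--     while lo < hi:
--         mid = (lo + hi) // 2
--         if s[mid] < x:
--             lo = mid + 1
--         else:
--             hi = mid
--     return len(s) - lo >= t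
-- ===== Notes on version B (the rewrite author's own statement) =====
-- stated objective: alternative
-- what changed: B sorts a copy of the indices and binary-searches for the first element >= i-L, comparing the suffix length to t, instead of A's linear scan counting elements one by one.
import Mathlib
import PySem

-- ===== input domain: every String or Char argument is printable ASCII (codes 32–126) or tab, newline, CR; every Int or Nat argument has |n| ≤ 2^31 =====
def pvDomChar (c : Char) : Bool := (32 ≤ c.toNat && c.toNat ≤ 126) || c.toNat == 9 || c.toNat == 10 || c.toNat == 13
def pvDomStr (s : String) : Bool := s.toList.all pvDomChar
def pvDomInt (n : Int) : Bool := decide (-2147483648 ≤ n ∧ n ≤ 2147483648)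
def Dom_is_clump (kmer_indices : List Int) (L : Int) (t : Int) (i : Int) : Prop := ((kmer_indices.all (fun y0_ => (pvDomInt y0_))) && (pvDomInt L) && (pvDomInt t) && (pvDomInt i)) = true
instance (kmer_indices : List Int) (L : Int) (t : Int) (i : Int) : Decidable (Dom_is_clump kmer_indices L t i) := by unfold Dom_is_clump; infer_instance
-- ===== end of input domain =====

-- B replaces A's linear counting scan by sort + hand-rolled binary search for the first
-- element >= i-L, comparing the suffix length to t (alternative algorithm, same result).


-- ===== PORT A =====
def is_clump (kmer_indices : List Int) (L : Int) (t : Int) (i : Int) : Bool :=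
  let count : Int := kmer_indices.foldl (fun count index => if i - index ≤ L then count + 1 else count) 0
  if count ≥ t then true else false

-- ===== PORT B =====
-- hand-rolled binary-search loop from Source B: first position in sorted s whose value is ≥ x.
-- s[mid] is ported as getD: 0 ≤ lo ≤ mid < hi ≤ len always holds here, so the index is in
-- range and getD equals Python's s[mid]; (lo+hi)//2 on nonnegative ints is Nat division.
def pvBisect (s : List Int) (x : Int) (lo hi : Nat) : Nat :=
  if _h : lo < hi then
    let mid := (lo + hi) / 2
    if s.getD mid 0 < x then pvBisect s x (mid + 1) hi else pvBisect s x lo mid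
  else lo
termination_by hi - lo
decreasing_by all_goals omega

def is_clump_alt (kmer_indices : List Int) (L : Int) (t : Int) (i : Int) : Bool :=
  let s := PySem.List.sorted kmer_indices (fun v => v) false
  let x := i - L
  let lo := pvBisect s x 0 s.length
  decide ((s.length : Int) - (lo : Int) ≥ t)

-- ===== PRECONDITION & SPEC =====
def Spec_is_clump (kmer_indices : List Int) (L : Int) (t : Int) (i : Int) (out : Bool) : Prop := out = is_clump_alt kmer_indices L t i
instance (kmer_indices : List Int) (L : Int) (t : Int) (i : Int) (out : Bool) : Decidable (Spec_is_clump kmer_indices L t i out) := by unfold Spec_is_clump; infer_instance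

-- ===== CLAIM (what is proved, stated in full; the proofs are below) =====
def Claim_equal_is_clump : Prop := ∀ (kmer_indices : List Int) (L : Int) (t : Int) (i : Int), Dom_is_clump kmer_indices L t i → Spec_is_clump kmer_indices L t i (is_clump kmer_indices L t i)

-- ===== LEMMAS AND PROOFS =====

-- A's fold counts the elements satisfying its predicate.
theorem foldl_count_eq (l : List Int) (L i : Int) (c : Int) :
    l.foldl (fun count index => if i - index ≤ L then count + 1 else count) c
      = c + (l.countP (fun a => decide (i - a ≤ L)) : Int) := by
  induction l generalizing c with
  | nil => simp
  | cons a tl ih =>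
    simp only [List.foldl_cons, List.countP_cons, ih]
    by_cases h : i - a ≤ L <;> simp [h] <;> ring

-- if the first r elements satisfy P and the rest do not, then countP = r
theorem countP_eq_of_split (P : Int → Bool) :
    ∀ (s : List Int) (r : Nat), r ≤ s.length →
    (∀ j, j < r → P (s.getD j 0) = true) →
    (∀ j, r ≤ j → j < s.length → P (s.getD j 0) = false) →
    s.countP P = r := by
  intro s
  induction s with
  | nil => intro r hr _ _; simp only [List.countP_nil]; simp at hr; omega
  | cons a tl ih =>
    intro r hr hlo hhi
    cases r with
    | zero =>
      have htl : tl.countP P = 0 := by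
        apply ih 0 (by omega) (by intro j hj; omega)
        intro j _ hj
        simpa using hhi (j + 1) (by omega) (by simp; omega)
      have ha : P a = false := by simpa using hhi 0 (by omega) (by simp)
      simp [ha, htl]
    | succ r' =>
      have ha : P a = true := by simpa using hlo 0 (by omega)
      have htl : tl.countP P = r' := by
        apply ih r' (by simp at hr; omega)
        · intro j hj; simpa using hlo (j + 1) (by omega)
        · intro j h1 h2; simpa using hhi (j + 1) (by omega) (by simp; omega)
      simp [ha, htl]

-- binary-search correctness on a sorted list, by the standard bracketing invariant
theorem pvBisect_spec (s : List Int) (x : Int) (hs : s.Pairwise (· ≤ ·)) :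
    ∀ (lo hi : Nat), lo ≤ hi → hi ≤ s.length →
    (∀ j, j < lo → s.getD j 0 < x) →
    (∀ j, hi ≤ j → j < s.length → ¬ s.getD j 0 < x) →
    pvBisect s x lo hi = s.countP (fun a => decide (a < x)) := by
  have hmono : ∀ p q : Nat, p ≤ q → q < s.length → s.getD p 0 ≤ s.getD q 0 := by
    intro p q hpq hq
    rcases Nat.lt_or_ge p q with h | h
    · have := (List.pairwise_iff_getElem.mp hs) p q (by omega) hq h
      rw [List.getD_eq_getElem s 0 (by omega), List.getD_eq_getElem s 0 hq]
      exact this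
    · have hpq' : p = q := by omega
      simp [hpq']
  intro lo hi
  induction lo, hi using pvBisect.induct s x with
  | case1 lo hi hlt mid hmid ih =>
    intro _ hlen hlo hhi
    have hmid' : s.getD ((lo + hi) / 2) 0 < x := hmid
    rw [pvBisect]
    simp only [dif_pos hlt]
    rw [if_pos hmid']
    apply ih (by omega) hlen _ hhi
    intro j hj
    exact lt_of_le_of_lt (hmono j ((lo + hi) / 2) (by omega) (by omega)) hmid'
  | case2 lo hi hlt mid hmid ih =>
    intro _ hlen hlo hhi
    have hmid' : ¬ s.getD ((lo + hi) / 2) 0 < x := hmid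
    rw [pvBisect]
    simp only [dif_pos hlt]
    rw [if_neg hmid']
    apply ih (by omega) (by omega) hlo
    intro j hj hjlen hcon
    exact hmid' (lt_of_le_of_lt (hmono ((lo + hi) / 2) j hj hjlen) hcon)
  | case3 lo hi hlt =>
    intro hle hlen hlo hhi
    rw [pvBisect]
    simp only [dif_neg hlt]
    refine (countP_eq_of_split _ s lo (by omega) ?_ ?_).symm
    · intro j hj; simpa using hlo j hj
    · intro j h1 h2; simpa using hhi j (by omega) h2

-- the two complementary counts partition the list
theorem countP_partition (L i : Int) (s : List Int) :
    s.countP (fun a => decide (a < i - L)) + s.countP (fun a => decide (i - a ≤ L)) = s.length := by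
  induction s with
  | nil => simp
  | cons a tl ih =>
    simp only [List.countP_cons, List.length_cons]
    by_cases h : a < i - L
    · have e1 : decide (a < i - L) = true := by simp [h]
      have e2 : decide (i - a ≤ L) = false := by simp; omega
      rw [e1, e2, if_pos rfl, if_neg (by simp : ¬ (false = true))]; omega
    · have e1 : decide (a < i - L) = false := by simp [h]
      have e2 : decide (i - a ≤ L) = true := by simp; omega
      rw [e1, e2, if_pos rfl, if_neg (by simp : ¬ (false = true))]; omega

-- ===== VERDICT (by name: the statement is the Claim_ definition above) =====
theorem is_clump_spec : Claim_equal_is_clump := by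
  intro kmer_indices L t i _
  show is_clump kmer_indices L t i = is_clump_alt kmer_indices L t i
  simp only [is_clump, is_clump_alt]
  set s := PySem.List.sorted kmer_indices (fun v => v) false with hsdef
  have hs : s.Pairwise (· ≤ ·) := by
    simpa using PySem.List.sorted_pairwise kmer_indices (fun v => v)
  have hperm : s.Perm kmer_indices := PySem.List.sorted_perm kmer_indices (fun v => v) false
  have hbis : pvBisect s (i - L) 0 s.length = s.countP (fun a => decide (a < i - L)) :=
    pvBisect_spec s (i - L) hs 0 s.length (by omega) (by omega)
      (by intro j hj; omega) (by intro j h1 h2; omega)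
  have hsplit := countP_partition L i s
  have hcount : kmer_indices.countP (fun a => decide (i - a ≤ L))
      = s.countP (fun a => decide (i - a ≤ L)) :=
    (hperm.countP_eq _).symm
  rw [foldl_count_eq, hbis]
  split_ifs with h
  · symm; simp only [decide_eq_true_eq]; omega
  · symm; simp only [decide_eq_false_iff_not]; omega
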